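-- pv_equiv track=rewrite | github.com/Talich12/deep_learning_study_projects | Python home task/task4.py | cumsum_and_erase
-- ===== SOURCE A (Python) =====
-- def cumsum_and_erase(A, erase = 1):
--     B = [0]
--     for i in A:
--         sum = B[-1] + i
--         B.append(sum)
--
--     C = B[1::]
--     for i in C:
--         if i == erase:
--             C.remove(i)
--     return C
-- ===== SOURCE B (Python) =====
-- def cumsum_and_erase(A, erase = 1):
--     C = []
--     s = 0
--     for x in A:
--         s += x
--         C.append(s)
--     return [x for x in C if x != erase]
-- ===== Notes on version B (the rewrite author's own statement) =====
-- stated objective: simpler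
-- what changed: A builds prefix sums by appending B[-1]+i to a seeded list and then calls list.remove inside a for-loop over the list it is mutating; B computes the prefix sums with a running accumulator and removes every element equal to erase in one filter pass.
-- intended difference: On inputs where some prefix of A sums to erase and the next element is 0 (two consecutive cumulative sums both equal erase), A's remove-while-iterating skips an element and returns a list that still contains erase (e.g. A=[1,0], erase=1 gives [1]); B returns the list with every occurrence of erase removed ([]), which is the function's evident intent. — e.g. on cumsum_and_erase([1, 0], 1): A returns [1], B returns []
import Mathlib
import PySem

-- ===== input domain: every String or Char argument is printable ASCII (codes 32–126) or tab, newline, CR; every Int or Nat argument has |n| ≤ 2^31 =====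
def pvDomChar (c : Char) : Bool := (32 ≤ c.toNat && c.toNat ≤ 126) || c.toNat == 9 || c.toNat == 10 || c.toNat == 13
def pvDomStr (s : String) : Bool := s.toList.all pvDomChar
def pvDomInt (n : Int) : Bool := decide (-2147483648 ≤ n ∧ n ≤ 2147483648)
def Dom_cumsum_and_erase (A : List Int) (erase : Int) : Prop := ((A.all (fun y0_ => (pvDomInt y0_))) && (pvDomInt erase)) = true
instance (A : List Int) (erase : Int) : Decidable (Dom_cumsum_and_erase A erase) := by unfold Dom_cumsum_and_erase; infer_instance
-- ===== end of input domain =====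

-- B computes the prefix sums with a running accumulator and removes every element
-- equal to erase in one filter pass (simpler; differs from A, per D_ below, exactly
-- where A's remove-while-iterating leaves an occurrence of erase behind).

-- ===== PORT A =====
-- the 'for i in A' loop appending B[-1] + i; B starts as [0] so B[-1] never
-- raises, and pyGetD's default 0 is never used (exact here)
def pvCumA (A : List Int) : List Int :=
  A.foldl (fun B i => B ++ [PySem.List.pyGetD B (-1) 0 + i]) [0]

-- 'for i in C: if i == erase: C.remove(i)' — Python iterates by index over the
-- mutating list; C.remove(i) removes the first occurrence (present since i ∈ C,
-- so remove?'s fallback .getD C is never used)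
def pvEraseLoop (erase : Int) (C : List Int) (k : Nat) : List Int :=
  if h : k < C.length then
    let i := C[k]
    if i = erase then
      pvEraseLoop erase ((PySem.List.remove? C i).getD C) (k + 1)
    else
      pvEraseLoop erase C (k + 1)
  else C
termination_by C.length - k
decreasing_by
  · have hm : C[k] ∈ C := List.getElem_mem h
    rw [PySem.List.remove?_eq_some_erase C C[k] hm]
    have := List.length_erase_of_mem hm
    simp only [Option.getD_some]
    omega
  · omega

def cumsum_and_erase (A : List Int) (erase : Int) : List Int :=
  pvEraseLoop erase (PySem.List.slice (pvCumA A) (some 1) none) 0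

-- ===== PORT B =====
-- prefix sums with a running accumulator s
def pvCumB (A : List Int) (s : Int) : List Int :=
  match A with
  | [] => []
  | x :: t => (s + x) :: pvCumB t (s + x)

-- '[x for x in C if x != erase]'
def cumsum_and_erase_alt (A : List Int) (erase : Int) : List Int :=
  (pvCumB A 0).filter (fun x => x != erase)

-- ===== PRECONDITION & SPEC =====
-- On inputs where some prefix of A sums to erase and the next element is 0 (two
-- consecutive cumulative sums both equal erase), A's remove-while-iterating skips
-- an element and returns a list still containing erase; B removes every
-- occurrence of erase, which is the function's evident intent.
def D_cumsum_and_erase (A : List Int) (erase : Int) : Prop :=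
  ∃ i, i + 1 < A.length ∧ (A.take (i + 1)).sum = erase ∧ A[i + 1]? = some (0 : Int)
instance (A : List Int) (erase : Int) : Decidable (D_cumsum_and_erase A erase) := by
  unfold D_cumsum_and_erase
  have : ∀ i, i + 1 < A.length ∧ (A.take (i + 1)).sum = erase ∧ A[i + 1]? = some (0 : Int) →
      i < A.length := fun i h => by omega
  exact decidable_of_iff (∃ i, i < A.length ∧ i + 1 < A.length ∧ (A.take (i + 1)).sum = erase ∧ A[i + 1]? = some (0 : Int))
    ⟨fun ⟨i, _, h⟩ => ⟨i, h⟩, fun ⟨i, h⟩ => ⟨i, by omega, h⟩⟩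

def Spec_cumsum_and_erase (A : List Int) (erase : Int) (out : List Int) : Prop :=
  ¬ D_cumsum_and_erase A erase → out = cumsum_and_erase_alt A erase
instance (A : List Int) (erase : Int) (out : List Int) : Decidable (Spec_cumsum_and_erase A erase out) := by unfold Spec_cumsum_and_erase; infer_instance

def pvDiffWitness_cumsum_and_erase : List Int × Int := ([1, 0], 1)
def pvDiffWitnessOut_cumsum_and_erase : (List Int) × (List Int) := ([1], [])

-- ===== CLAIM (what is proved, stated in full; the proofs are below) =====
def Claim_unchanged_cumsum_and_erase : Prop := ∀ (A : List Int) (erase : Int), Dom_cumsum_and_erase A erase → Spec_cumsum_and_erase A erase (cumsum_and_erase A erase)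
def Claim_changed_cumsum_and_erase : Prop := Dom_cumsum_and_erase (pvDiffWitness_cumsum_and_erase.1) (pvDiffWitness_cumsum_and_erase.2) ∧ D_cumsum_and_erase (pvDiffWitness_cumsum_and_erase.1) (pvDiffWitness_cumsum_and_erase.2) ∧ cumsum_and_erase (pvDiffWitness_cumsum_and_erase.1) (pvDiffWitness_cumsum_and_erase.2) = pvDiffWitnessOut_cumsum_and_erase.1 ∧ cumsum_and_erase_alt (pvDiffWitness_cumsum_and_erase.1) (pvDiffWitness_cumsum_and_erase.2) = pvDiffWitnessOut_cumsum_and_erase.2 ∧ pvDiffWitnessOut_cumsum_and_erase.1 ≠ pvDiffWitnessOut_cumsum_and_erase.2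
def Claim_exact_cumsum_and_erase : Prop := ∀ (A : List Int) (erase : Int), Dom_cumsum_and_erase A erase → D_cumsum_and_erase A erase → cumsum_and_erase A erase ≠ cumsum_and_erase_alt A erase

-- ===== LEMMAS AND PROOFS =====

-- A's cumulative-sum loop equals B's accumulator pass (after dropping the seed 0)
theorem pvCumA_inv (A : List Int) : ∀ (B0 : List Int) (s : Int),
    A.foldl (fun B i => B ++ [PySem.List.pyGetD B (-1) 0 + i]) (B0 ++ [s])
      = (B0 ++ [s]) ++ pvCumB A s := by
  induction A with
  | nil => intro B0 s; simp [pvCumB]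
  | cons x t ih =>
    intro B0 s
    simp only [List.foldl_cons, PySem.List.pyGetD_neg_one_append_singleton]
    have := ih (B0 ++ [s]) (s + x)
    simp only [List.append_assoc, List.cons_append, List.nil_append] at this ⊢
    rw [this]
    simp [pvCumB]

theorem pvCumA_eq (A : List Int) :
    PySem.List.slice (pvCumA A) (some 1) none = pvCumB A 0 := by
  have h := pvCumA_inv A [] 0
  simp only [List.nil_append] at h
  rw [pvCumA, h, PySem.List.slice_from_one]
  simp

-- proof-side helpers: the final count r of removals A performs, and
-- 'drop the first r occurrences of erase'
def pvCount (C : List Int) (erase : Int) (g r : Nat) : Nat :=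
  if h : g < C.length then
    if C[g] = erase then pvCount C erase (g + 2) (r + 1)
    else pvCount C erase (g + 1) r
  else r
termination_by C.length - g

def pvStrip (C : List Int) (erase : Int) (r : Nat) : List Int :=
  match C with
  | [] => []
  | x :: t => if 0 < r ∧ x = erase then pvStrip t erase (r - 1)
              else x :: pvStrip t erase r

theorem pvStrip_zero (e : Int) (C : List Int) : pvStrip C e 0 = C := by
  induction C with
  | nil => rfl
  | cons x t ih => simp [pvStrip, ih]

theorem count_take_mono (e : Int) (C : List Int) {m n : Nat} (h : m ≤ n) :
    (C.take m).count e ≤ (C.take n).count e := by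
  have h1 : C.take m = (C.take n).take m := by rw [List.take_take, Nat.min_eq_left h]
  rw [h1]
  exact (List.take_prefix m (C.take n)).sublist.count_le e

theorem count_take_succ (e : Int) (C : List Int) {g : Nat} (h : g < C.length) (he : C[g] = e) :
    (C.take (g + 1)).count e = (C.take g).count e + 1 := by
  rw [List.take_add_one]
  simp [List.getElem?_eq_getElem h, he]

theorem pvStrip_getElem? (e : Int) : ∀ (C : List Int) (k r : Nat),
    r ≤ (C.take (k + r)).count e → (pvStrip C e r)[k]? = C[k + r]? := by
  intro C
  induction C with
  | nil => intro k r _; simp [pvStrip]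
  | cons x t ih =>
    intro k r hc
    match r with
    | 0 => rw [pvStrip_zero]; simp
    | r + 1 =>
      have htake : (x :: t).take (k + (r + 1)) = x :: t.take (k + r) := by
        have : k + (r + 1) = (k + r) + 1 := by omega
        rw [this]; rfl
      rw [htake, List.count_cons] at hc
      by_cases hx : x = e
      · subst hx
        simp only [beq_self_eq_true, if_pos] at hc
        have hstep : pvStrip (x :: t) x (r + 1) = pvStrip t x r := by
          simp [pvStrip]
        rw [hstep]
        have harith : k + (r + 1) = (k + r) + 1 := by omega
        rw [harith, List.getElem?_cons_succ]
        exact ih k r (by omega)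
      · have hbeq : (x == e) = false := by simpa using hx
        rw [hbeq] at hc
        simp only [if_neg Bool.false_ne_true, Nat.add_zero] at hc
        have hstep : pvStrip (x :: t) e (r + 1) = x :: pvStrip t e (r + 1) := by
          simp [pvStrip, hx]
        match k with
        | 0 =>
          exfalso
          have h1 : (t.take r).count e ≤ (t.take r).length := List.count_le_length
          have h2 : (t.take r).length ≤ r := List.length_take_le r t
          simp only [Nat.zero_add] at hc
          omega
        | k + 1 =>
          rw [hstep, List.getElem?_cons_succ]
          have harith : k + 1 + (r + 1) = (k + (r + 1)) + 1 := by omega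
          rw [harith, List.getElem?_cons_succ]
          have : k + 1 + r = k + (r + 1) := by omega
          rw [this] at hc
          exact ih k (r + 1) hc

theorem pvStrip_length (e : Int) : ∀ (C : List Int) (r : Nat),
    r ≤ C.count e → (pvStrip C e r).length = C.length - r := by
  intro C
  induction C with
  | nil => intro r _; simp [pvStrip]
  | cons x t ih =>
    intro r hc
    match r with
    | 0 => rw [pvStrip_zero]; simp
    | r + 1 =>
      rw [List.count_cons] at hc
      by_cases hx : x = e
      · subst hx
        simp only [beq_self_eq_true, if_pos] at hc
        have hstep : pvStrip (x :: t) x (r + 1) = pvStrip t x r := by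
          simp [pvStrip]
        rw [hstep, ih r (by omega)]
        simp
      · have hbeq : (x == e) = false := by simpa using hx
        rw [hbeq] at hc
        simp only [if_neg Bool.false_ne_true, Nat.add_zero] at hc
        have hstep : pvStrip (x :: t) e (r + 1) = x :: pvStrip t e (r + 1) := by
          simp [pvStrip, hx]
        have hlen : r + 1 ≤ t.length := le_trans hc List.count_le_length
        rw [hstep]
        simp only [List.length_cons, ih (r + 1) hc]
        omega

theorem pvRemove_strip (e : Int) : ∀ (C : List Int) (r : Nat),
    r < C.count e → PySem.List.remove? (pvStrip C e r) e = some (pvStrip C e (r + 1)) := by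
  intro C
  induction C with
  | nil => intro r hc; simp at hc
  | cons x t ih =>
    intro r hc
    rw [List.count_cons] at hc
    by_cases hx : x = e
    · subst hx
      simp only [beq_self_eq_true, if_pos] at hc
      match r with
      | 0 =>
        rw [pvStrip_zero]
        rw [PySem.List.remove?_cons_self]
        simp [pvStrip, pvStrip_zero]
      | r + 1 =>
        have hstep : pvStrip (x :: t) x (r + 1) = pvStrip t x r := by
          simp [pvStrip]
        have hstep2 : pvStrip (x :: t) x (r + 2) = pvStrip t x (r + 1) := by
          simp [pvStrip]
        rw [hstep, hstep2]
        exact ih r (by omega)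
    · have hbeq : (x == e) = false := by simpa using hx
      rw [hbeq] at hc
      simp only [if_neg Bool.false_ne_true, Nat.add_zero] at hc
      match r with
      | 0 =>
        rw [pvStrip_zero]
        have h1 := ih 0 hc
        rw [pvStrip_zero] at h1
        rw [PySem.List.remove?_cons_of_ne t hx, h1]
        simp [pvStrip, hx]
      | r + 1 =>
        have hstep : pvStrip (x :: t) e (r + 1) = x :: pvStrip t e (r + 1) := by
          simp [pvStrip, hx]
        have hstep2 : pvStrip (x :: t) e (r + 2) = x :: pvStrip t e (r + 2) := by
          simp [pvStrip, hx]
        rw [hstep, hstep2, PySem.List.remove?_cons_of_ne _ hx, ih (r + 1) hc]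
        rfl

-- the main invariant: A's mutating loop, started after r removals all lying in
-- the first k+r original positions, equals stripping the final count
theorem pvMain (e : Int) (C : List Int) : ∀ (d k r : Nat),
    C.length - (k + r) ≤ d → r ≤ (C.take (k + r)).count e →
    pvEraseLoop e (pvStrip C e r) k = pvStrip C e (pvCount C e (k + r) r) := by
  intro d
  induction d with
  | zero =>
    intro k r hd hc
    have hcC : r ≤ C.count e := le_trans hc ((List.take_prefix _ C).sublist.count_le e)
    have hlen : (pvStrip C e r).length = C.length - r := pvStrip_length e C r hcC
    rw [pvEraseLoop, pvCount]
    rw [dif_neg (by omega), dif_neg (by omega)]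
  | succ d ih =>
    intro k r hd hc
    have hcC : r ≤ C.count e := le_trans hc ((List.take_prefix _ C).sublist.count_le e)
    have hlen : (pvStrip C e r).length = C.length - r := pvStrip_length e C r hcC
    by_cases hg : k + r < C.length
    · have hrle : r ≤ C.length := le_trans hcC List.count_le_length
      have hk : k < (pvStrip C e r).length := by omega
      have hget : (pvStrip C e r)[k] = C[k + r] := by
        have h1 := pvStrip_getElem? e C k r hc
        rw [List.getElem?_eq_getElem hk, List.getElem?_eq_getElem hg] at h1
        exact Option.some.inj h1
      rw [pvEraseLoop, dif_pos hk]
      rw [pvCount, dif_pos hg]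
      simp only [hget]
      by_cases hx : C[k + r] = e
      · rw [if_pos hx, if_pos hx]
        have hcnt1 : r + 1 ≤ (C.take (k + r + 1)).count e := by
          rw [count_take_succ e C hg hx]; omega
        have hrem : r < C.count e := by
          have := le_trans hcnt1 ((List.take_prefix _ C).sublist.count_le e)
          omega
        rw [hx, pvRemove_strip e C r hrem]
        simp only [Option.getD_some]
        have harith : k + 1 + (r + 1) = k + r + 2 := by omega
        have := ih (k + 1) (r + 1) (by omega)
          (by rw [harith]; exact le_trans hcnt1 (count_take_mono e C (by omega)))
        rw [harith] at this
        exact this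
      · rw [if_neg hx, if_neg hx]
        have harith : k + 1 + r = k + r + 1 := by omega
        have := ih (k + 1) r (by omega)
          (by rw [harith]; exact le_trans hc (count_take_mono e C (by omega)))
        rw [harith] at this
        exact this
    · rw [pvEraseLoop, pvCount]
      rw [dif_neg (by omega), dif_neg (by omega)]

theorem pvA_strip (A : List Int) (e : Int) :
    cumsum_and_erase A e = pvStrip (pvCumB A 0) e (pvCount (pvCumB A 0) e 0 0) := by
  rw [cumsum_and_erase, pvCumA_eq]
  have h := pvMain e (pvCumB A 0) ((pvCumB A 0).length) 0 0 (by omega) (by simp)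
  rw [pvStrip_zero] at h
  simpa using h

-- prefix-sum facts linking D_ (a statement about A) to the scanned list C
theorem pvCumB_length : ∀ (A : List Int) (s : Int), (pvCumB A s).length = A.length := by
  intro A
  induction A with
  | nil => intro s; rfl
  | cons x t ih => intro s; simp [pvCumB, ih]

theorem pvCumB_getElem? : ∀ (A : List Int) (s : Int) (i : Nat), i < A.length →
    (pvCumB A s)[i]? = some (s + (A.take (i + 1)).sum) := by
  intro A
  induction A with
  | nil => intro s i h; simp at h
  | cons x t ih =>
    intro s i h
    match i with
    | 0 => simp [pvCumB]
    | i + 1 =>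
      simp only [pvCumB, List.getElem?_cons_succ]
      rw [ih (s + x) i (by simpa using h)]
      have : (x :: t).take (i + 1 + 1) = x :: t.take (i + 1) := rfl
      rw [this]
      simp only [List.sum_cons, Option.some.injEq]
      ring

-- D_ holds exactly when C has two consecutive entries both equal to e
theorem pvD_iff (A : List Int) (e : Int) :
    D_cumsum_and_erase A e ↔
      ∃ i, i + 1 < (pvCumB A 0).length ∧ (pvCumB A 0)[i]? = some e ∧ (pvCumB A 0)[i + 1]? = some e := by
  unfold D_cumsum_and_erase
  constructor
  · rintro ⟨i, hi, hsum, hnext⟩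
    refine ⟨i, by rw [pvCumB_length]; exact hi, ?_, ?_⟩
    · rw [pvCumB_getElem? A 0 i (by omega)]
      simp [hsum]
    · rw [pvCumB_getElem? A 0 (i + 1) hi]
      have htk : A.take (i + 1 + 1) = A.take (i + 1) ++ [A[i + 1]'hi] := by
        rw [List.take_add_one, List.getElem?_eq_getElem hi]
        rfl
      have hA : A[i + 1]'hi = 0 := by
        rw [List.getElem?_eq_getElem hi] at hnext
        exact Option.some.inj hnext
      rw [htk]
      simp [hsum, hA]
  · rintro ⟨i, hi, h1, h2⟩
    rw [pvCumB_length] at hi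
    rw [pvCumB_getElem? A 0 i (by omega)] at h1
    rw [pvCumB_getElem? A 0 (i + 1) hi] at h2
    have hsum : (A.take (i + 1)).sum = e := by
      have := Option.some.inj h1; omega
    refine ⟨i, hi, hsum, ?_⟩
    have htk : A.take (i + 1 + 1) = A.take (i + 1) ++ [A[i + 1]'hi] := by
      rw [List.take_add_one, List.getElem?_eq_getElem hi]
      rfl
    rw [htk] at h2
    have h2' := Option.some.inj h2
    simp only [List.sum_append, List.sum_cons, List.sum_nil] at h2'
    rw [List.getElem?_eq_getElem hi]
    have : A[i + 1]'hi = 0 := by omega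
    rw [this]

-- with no two consecutive e's, the skip misses nothing: pvCount counts all of them
theorem pvCount_noadj (e : Int) (C : List Int)
    (hadj : ∀ i, i + 1 < C.length → C[i]? = some e → C[i + 1]? ≠ some e) :
    ∀ (d g r : Nat), C.length - g ≤ d → pvCount C e g r = r + (C.drop g).count e := by
  intro d
  induction d with
  | zero =>
    intro g r hd
    rw [pvCount, dif_neg (by omega), List.drop_eq_nil_of_le (by omega)]
    simp
  | succ d ih =>
    intro g r hd
    by_cases hg : g < C.length
    · rw [pvCount, dif_pos hg]
      have hdropg : C.drop g = C[g] :: C.drop (g + 1) := List.drop_eq_getElem_cons hg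
      by_cases hx : C[g] = e
      · rw [if_pos hx]
        have hnext : (C.drop (g + 1)).count e = (C.drop (g + 2)).count e := by
          by_cases hg1 : g + 1 < C.length
          · have hdropg1 : C.drop (g + 1) = C[g + 1] :: C.drop (g + 2) :=
              List.drop_eq_getElem_cons hg1
            have hne : C[g + 1] ≠ e := by
              intro h
              exact hadj g hg1 (by rw [List.getElem?_eq_getElem hg, hx])
                (by rw [List.getElem?_eq_getElem hg1, h])
            rw [hdropg1, List.count_cons]
            simp [hne]
          · rw [List.drop_eq_nil_of_le (by omega), List.drop_eq_nil_of_le (by omega)]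
        rw [ih (g + 2) (r + 1) (by omega), hdropg, List.count_cons]
        simp only [hx, beq_self_eq_true, if_pos]
        omega
      · rw [if_neg hx, ih (g + 1) r (by omega), hdropg, List.count_cons]
        have : (C[g] == e) = false := by simpa using hx
        rw [this]
        simp
    · rw [pvCount, dif_neg hg, List.drop_eq_nil_of_le (by omega)]
      simp

-- pvCount never exceeds the number of occurrences ahead of the scan point
theorem pvCount_le (e : Int) (C : List Int) :
    ∀ (d g r : Nat), C.length - g ≤ d → pvCount C e g r ≤ r + (C.drop g).count e := by
  intro d
  induction d with
  | zero =>
    intro g r hd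
    rw [pvCount, dif_neg (by omega)]
    omega
  | succ d ih =>
    intro g r hd
    by_cases hg : g < C.length
    · rw [pvCount, dif_pos hg]
      have hdropg : C.drop g = C[g] :: C.drop (g + 1) := List.drop_eq_getElem_cons hg
      have hsub : (C.drop (g + 2)).count e ≤ (C.drop (g + 1)).count e := by
        have h : (C.drop (g + 2)).Sublist (C.drop (g + 1)) :=
          List.drop_sublist_drop_left C (by omega)
        exact h.count_le e
      by_cases hx : C[g] = e
      · rw [if_pos hx]
        have := ih (g + 2) (r + 1) (by omega)
        rw [hdropg, List.count_cons]
        simp only [hx, beq_self_eq_true, if_pos]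
        omega
      · rw [if_neg hx]
        have := ih (g + 1) r (by omega)
        rw [hdropg, List.count_cons]
        have hb : (C[g] == e) = false := by simpa using hx
        rw [hb]
        simp only [if_neg Bool.false_ne_true, Nat.add_zero]
        omega
    · rw [pvCount, dif_neg hg]
      omega

-- with two consecutive e's ahead of the scan point, at least one occurrence is missed
theorem pvCount_lt (e : Int) (C : List Int) :
    ∀ (d g r : Nat), C.length - g ≤ d →
    (∃ i, g ≤ i ∧ i + 1 < C.length ∧ C[i]? = some e ∧ C[i + 1]? = some e) →
    pvCount C e g r + 1 ≤ r + (C.drop g).count e := by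
  intro d
  induction d with
  | zero =>
    intro g r hd ⟨i, hgi, hi, _, _⟩
    omega
  | succ d ih =>
    intro g r hd ⟨i, hgi, hi, h1, h2⟩
    have hg : g < C.length := by omega
    rw [pvCount, dif_pos hg]
    have hdropg : C.drop g = C[g] :: C.drop (g + 1) := List.drop_eq_getElem_cons hg
    by_cases hx : C[g] = e
    · rw [if_pos hx]
      by_cases hg1e : g + 1 < C.length ∧ C[g + 1]? = some e
      · -- the next entry is also e: the general bound already loses one here
        obtain ⟨hg1, hg1e⟩ := hg1e
        have hdropg1 : C.drop (g + 1) = C[g + 1] :: C.drop (g + 2) :=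
          List.drop_eq_getElem_cons hg1
        have hCg1 : C[g + 1] = e := by
          rw [List.getElem?_eq_getElem hg1] at hg1e
          exact Option.some.inj hg1e
        have hb := pvCount_le e C (C.length) (g + 2) (r + 1) (by omega)
        rw [hdropg, hdropg1, List.count_cons, List.count_cons]
        simp only [hx, hCg1, beq_self_eq_true, if_pos]
        omega
      · -- the witness pair lies strictly ahead: recurse at g + 2
        have hiw : g + 2 ≤ i := by
          by_contra hcon
          have hcase : i = g ∨ i = g + 1 := by omega
          rcases hcase with hc | hc
          · subst hc; exact hg1e ⟨hi, h2⟩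
          · subst hc; exact hg1e ⟨by omega, h1⟩
        have := ih (g + 2) (r + 1) (by omega) ⟨i, by omega, hi, h1, h2⟩
        have hnext : (C.drop (g + 2)).count e ≤ (C.drop (g + 1)).count e := by
          have h : (C.drop (g + 2)).Sublist (C.drop (g + 1)) :=
            List.drop_sublist_drop_left C (by omega)
          exact h.count_le e
        rw [hdropg, List.count_cons]
        simp only [hx, beq_self_eq_true, if_pos]
        omega
    · rw [if_neg hx]
      have hgi' : g + 1 ≤ i := by
        rcases Nat.lt_or_ge i (g + 1) with hlt | hge
        · have : i = g := by omega
          subst this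
          rw [List.getElem?_eq_getElem hg] at h1
          exact absurd (Option.some.inj h1) hx
        · exact hge
      have := ih (g + 1) r (by omega) ⟨i, hgi', hi, h1, h2⟩
      rw [hdropg, List.count_cons]
      have hb : (C[g] == e) = false := by simpa using hx
      rw [hb]
      simp only [if_neg Bool.false_ne_true, Nat.add_zero]
      omega

-- stripping all occurrences is filtering
theorem pvStrip_all (e : Int) : ∀ (C : List Int) (r : Nat),
    C.count e ≤ r → pvStrip C e r = C.filter (fun x => x != e) := by
  intro C
  induction C with
  | nil => intro r _; simp [pvStrip]
  | cons x t ih =>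
    intro r hc
    rw [List.count_cons] at hc
    by_cases hx : x = e
    · subst hx
      simp only [beq_self_eq_true, if_pos] at hc
      have hr : 0 < r := by omega
      have : pvStrip (x :: t) x r = pvStrip t x (r - 1) := by
        simp [pvStrip, hr]
      rw [this, ih (r - 1) (by omega), List.filter_cons]
      simp
    · have hb : (x == e) = false := by simpa using hx
      rw [hb] at hc
      simp only [if_neg Bool.false_ne_true, Nat.add_zero] at hc
      have : pvStrip (x :: t) e r = x :: pvStrip t e r := by
        simp [pvStrip, hx]
      rw [this, ih r hc, List.filter_cons, if_pos (by simp [hx])]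

theorem pvFilter_length (e : Int) (C : List Int) :
    (C.filter (fun x => x != e)).length = C.length - C.count e := by
  induction C with
  | nil => rfl
  | cons x t ih =>
    by_cases hx : x = e
    · subst hx
      have hle : t.count x ≤ t.length := List.count_le_length
      rw [List.filter_cons, if_neg (by simp), List.count_cons_self, ih, List.length_cons]
      omega
    · have hle : t.count e ≤ t.length := List.count_le_length
      rw [List.filter_cons, if_pos (by simp [hx]), List.length_cons, ih, List.count_cons,
        List.length_cons]
      have hb : (x == e) = false := by simpa using hx
      rw [hb]
      simp only [if_neg Bool.false_ne_true, Nat.add_zero]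
      omega

-- ===== VERDICT (by name: the statements are the Claim_ definitions above) =====
theorem cumsum_and_erase_spec : Claim_unchanged_cumsum_and_erase := by
  intro A e _ hD
  show cumsum_and_erase A e = cumsum_and_erase_alt A e
  rw [pvA_strip, cumsum_and_erase_alt]
  have hadj : ∀ i, i + 1 < (pvCumB A 0).length → (pvCumB A 0)[i]? = some e →
      (pvCumB A 0)[i + 1]? ≠ some e := by
    intro i hi h1 h2
    exact hD ((pvD_iff A e).mpr ⟨i, hi, h1, h2⟩)
  have hcnt := pvCount_noadj e (pvCumB A 0) hadj ((pvCumB A 0).length) 0 0 (by omega)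
  rw [hcnt]
  simp only [List.drop_zero, Nat.zero_add]
  exact pvStrip_all e (pvCumB A 0) _ (le_refl _)

theorem cumsum_and_erase_changed : Claim_changed_cumsum_and_erase := by
  unfold Claim_changed_cumsum_and_erase
  refine ⟨by decide, ⟨0, by decide⟩, ?_, by decide, by decide⟩
  show cumsum_and_erase [1, 0] 1 = [1]
  rw [pvA_strip]
  have hC : pvCumB [1, 0] 0 = [1, 1] := by norm_num [pvCumB]
  rw [hC]
  have h2 : pvCount [1, 1] 1 2 1 = 1 := by rw [pvCount]; norm_num
  have h0 : pvCount [1, 1] 1 0 0 = 1 := by rw [pvCount]; norm_num [h2]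
  rw [h0]
  norm_num [pvStrip]

theorem cumsum_and_erase_tight : Claim_exact_cumsum_and_erase := by
  intro A e _ hD heq
  obtain ⟨i, hi, h1, h2⟩ := (pvD_iff A e).mp hD
  have hlt := pvCount_lt e (pvCumB A 0) ((pvCumB A 0).length) 0 0 (by omega)
    ⟨i, by omega, hi, h1, h2⟩
  simp only [List.drop_zero, Nat.zero_add] at hlt
  have hccount : (pvCumB A 0).count e ≤ (pvCumB A 0).length := List.count_le_length
  have hslen := pvStrip_length e (pvCumB A 0) (pvCount (pvCumB A 0) e 0 0) (by omega)
  have hflen := pvFilter_length e (pvCumB A 0)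
  rw [pvA_strip, cumsum_and_erase_alt] at heq
  have := congrArg List.length heq
  rw [hslen, hflen] at this
  omega
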